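-- pv_equiv track=rewrite | github.com/aniaodoj66/WDI | sprawdziany/2019/1.2_2019.py | ilosc_jedynek
-- ===== SOURCE A (Python) =====
-- def ilosc_jedynek(x):
--     ilosc = 0
--     while x > 0:
--         if x % 10 == 1:
--             ilosc += 1
--         x = x // 10
--     if ilosc % 2 == 1:
--         return True
--     else:
--         return False
-- ===== SOURCE B (Python) =====
-- def ilosc_jedynek(x):
--     return x > 0 and str(x).count('1') % 2 == 1
-- ===== Notes on version B (the rewrite author's own statement) =====
-- stated objective: idiomatic
-- what changed: Replaces the arithmetic mod/floordiv digit-extraction loop and counter with a single-expression scan of the decimal string representation (str(x).count('1')), taking its parity.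
import Mathlib
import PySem

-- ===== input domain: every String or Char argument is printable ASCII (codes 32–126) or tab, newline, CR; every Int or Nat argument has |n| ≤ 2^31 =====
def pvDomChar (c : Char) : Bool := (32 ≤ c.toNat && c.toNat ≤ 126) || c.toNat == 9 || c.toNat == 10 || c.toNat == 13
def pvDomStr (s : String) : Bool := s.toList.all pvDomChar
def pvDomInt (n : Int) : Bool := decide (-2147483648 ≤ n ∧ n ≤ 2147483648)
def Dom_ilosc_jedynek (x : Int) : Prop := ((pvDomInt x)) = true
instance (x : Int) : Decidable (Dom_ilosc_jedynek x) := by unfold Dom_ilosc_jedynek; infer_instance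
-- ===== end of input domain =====

-- B replaces A's arithmetic mod/floordiv digit-extraction loop by a single scan of the
-- decimal string representation (str(x).count('1') parity); objective: idiomatic.


-- ===== PORT A =====
-- the 'while x > 0' loop carrying the counter 'ilosc'
def iloscLoop (x : Int) (ilosc : Int) : Int :=
  if x > 0 then
    iloscLoop (PySem.Int.floordiv x 10)
      (if PySem.Int.mod x 10 == 1 then ilosc + 1 else ilosc)
  else ilosc
termination_by x.toNat
decreasing_by
  rename_i h
  simp only [PySem.Int.floordiv]
  rw [Int.fdiv_eq_ediv]
  simp
  omega

def ilosc_jedynek (x : Int) : Bool :=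
  let ilosc := iloscLoop x 0
  if PySem.Int.mod ilosc 2 == 1 then true else false

-- ===== PORT B =====
def ilosc_jedynek_alt (x : Int) : Bool :=
  decide (x > 0) && (PySem.Str.count (PySem.Int.toStr x) "1" % 2 == 1)

-- ===== PRECONDITION & SPEC =====
def Spec_ilosc_jedynek (x : Int) (out : Bool) : Prop := out = ilosc_jedynek_alt x
instance (x : Int) (out : Bool) : Decidable (Spec_ilosc_jedynek x out) := by unfold Spec_ilosc_jedynek; infer_instance

-- ===== CLAIM (what is proved, stated in full; the proofs are below) =====
def Claim_equal_ilosc_jedynek : Prop := ∀ (x : Int), Dom_ilosc_jedynek x → Spec_ilosc_jedynek x (ilosc_jedynek x)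

-- ===== LEMMAS AND PROOFS =====

-- number of decimal digits equal to 1
def ones : Nat → Nat
  | 0 => 0
  | n + 1 => (if (n + 1) % 10 = 1 then 1 else 0) + ones ((n + 1) / 10)
decreasing_by exact Nat.div_lt_self (Nat.succ_pos n) (by omega)

lemma ones_zero : ones 0 = 0 := by rw [ones.eq_def]

lemma ones_pos (n : Nat) (h : 0 < n) :
    ones n = (if n % 10 = 1 then 1 else 0) + ones (n / 10) := by
  cases n with
  | zero => omega
  | succ m => rw [ones.eq_def]

lemma floordiv_natCast (k : Nat) : PySem.Int.floordiv ((k : Nat) : Int) 10 = ((k / 10 : Nat) : Int) := by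
  simp only [PySem.Int.floordiv]
  rw [Int.fdiv_eq_ediv]
  simp

lemma mod10_natCast (k : Nat) : PySem.Int.mod ((k : Nat) : Int) 10 = ((k % 10 : Nat) : Int) := by
  simp only [PySem.Int.mod]
  rw [Int.fmod_eq_emod]
  simp

lemma mod2_natCast (k : Nat) : PySem.Int.mod ((k : Nat) : Int) 2 = ((k % 2 : Nat) : Int) := by
  simp only [PySem.Int.mod]
  rw [Int.fmod_eq_emod]
  simp

lemma iloscLoop_eq (n : Nat) : ∀ (c : Int), iloscLoop (n : Int) c = c + (ones n : Int) := by
  induction n using Nat.strong_induction_on with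
  | _ n ih =>
    intro c
    cases n with
    | zero => rw [iloscLoop.eq_def, ones.eq_def]; simp
    | succ m =>
      rw [iloscLoop.eq_def]
      have hpos : ((m + 1 : Nat) : Int) > 0 := by positivity
      rw [if_pos hpos]
      rw [show ((m + 1 : Nat) : Int) = (((m + 1 : Nat) : Nat) : Int) from rfl]
      rw [floordiv_natCast (m + 1), mod10_natCast (m + 1)]
      rw [ih ((m + 1) / 10) (Nat.div_lt_self (Nat.succ_pos m) (by omega)) _]
      rw [ones_pos (m + 1) (Nat.succ_pos m)]
      have hcast : ((((m + 1) % 10 : Nat) : Int) == 1) = decide ((m + 1) % 10 = 1) := by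
        by_cases h1 : (m + 1) % 10 = 1
        · simp [h1]
        · simp [h1]; omega
      rw [hcast]
      by_cases h1 : (m + 1) % 10 = 1 <;> simp [h1] <;> push_cast <;> ring

-- single-character count.go counts occurrences of that character
lemma count_go_single (ch : Char) : ∀ (fuel : Nat) (l : List Char) (acc : Nat),
    l.length ≤ fuel → PySem.Chars.count.go [ch] fuel l acc = acc + l.count ch := by
  intro fuel
  induction fuel with
  | zero =>
    intro l acc h
    cases l with
    | nil => rw [PySem.Chars.count.go.eq_def]; simp
    | cons a t => simp at h
  | succ f ih =>
    intro l acc h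
    cases l with
    | nil => rw [PySem.Chars.count.go.eq_def]; simp
    | cons a t =>
      rw [PySem.Chars.count.go.eq_def]
      simp only [List.isPrefixOf, Bool.and_true]
      by_cases hc : ch = a
      · subst hc
        simp only [beq_self_eq_true, if_true, List.length_cons, List.drop_succ_cons,
          List.length_nil, List.drop_zero]
        rw [ih t (acc + 1) (by simpa using h)]
        simp
        omega
      · have hb : (ch == a) = false := by simp [hc]
        rw [hb]
        simp only [Bool.false_eq_true, if_false]
        rw [ih t acc (by simpa using h)]
        simp [Ne.symm hc]

lemma chars_count_single (ch : Char) (l : List Char) :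
    PySem.Chars.count l [ch] = l.count ch := by
  rw [PySem.Chars.count]
  simp only [List.isEmpty_cons, Bool.false_eq_true, if_false]
  rw [count_go_single ch l.length l 0 (le_refl _)]
  simp

-- count of '1' among the decimal digits emitted by Nat.toDigitsCore equals ones n
lemma toDigitsCore_count (fuel : Nat) : ∀ (n : Nat) (ds : List Char), n < 10 ^ fuel →
    (Nat.toDigitsCore 10 fuel n ds).count '1' = ones n + ds.count '1' := by
  induction fuel with
  | zero =>
    intro n ds h
    interval_cases n
    rw [Nat.toDigitsCore, ones.eq_def]
    simp
  | succ f ih =>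
    intro n ds h
    rw [Nat.toDigitsCore]
    have hdig : (Nat.digitChar (n % 10) == '1') = (decide (n % 10 = 1)) := by
      have : n % 10 < 10 := Nat.mod_lt n (by omega)
      interval_cases hm : (n % 10) <;> simp [Nat.digitChar]
    by_cases h0 : n / 10 = 0
    · rw [if_pos h0]
      rw [List.count_cons, hdig]
      cases Nat.eq_zero_or_pos n with
      | inl hz => subst hz; simp [ones_zero]
      | inr hp =>
        rw [ones_pos n hp, h0, ones_zero]
        by_cases h1 : n % 10 = 1 <;> simp [h1] <;> omega
    · rw [if_neg h0]
      have hlt : n / 10 < 10 ^ f := by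
        have : 10 ^ (f + 1) = 10 ^ f * 10 := pow_succ 10 f
        omega
      rw [ih (n / 10) _ hlt]
      have hpos : 0 < n := by
        by_contra hz
        simp [Nat.eq_zero_of_not_pos hz] at h0
      rw [ones_pos n hpos, List.count_cons, hdig]
      by_cases h1 : n % 10 = 1 <;> simp [h1, ones_zero] <;> omega

lemma toDigits_count (n : Nat) : (Nat.toDigits 10 n).count '1' = ones n := by
  rw [Nat.toDigits]
  have hb : n < 10 ^ (n + 1) := by
    have h1 : n < 2 ^ n := Nat.lt_two_pow_self
    have h2 : 2 ^ n ≤ 10 ^ n := Nat.pow_le_pow_left (by norm_num) n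
    have h3 : 10 ^ n ≤ 10 ^ (n + 1) := Nat.pow_le_pow_right (by norm_num) (Nat.le_succ n)
    omega
  rw [toDigitsCore_count (n + 1) n [] hb]
  simp

-- ===== VERDICT (by name: the statement is the Claim_ definition above) =====
theorem ilosc_jedynek_spec : Claim_equal_ilosc_jedynek := by
  intro x _
  unfold Spec_ilosc_jedynek ilosc_jedynek ilosc_jedynek_alt
  by_cases hx : x > 0
  · lift x to ℕ using le_of_lt hx with n
    have hloop : iloscLoop (n : Int) 0 = (ones n : Int) := by
      rw [iloscLoop_eq n 0]; ring
    have hcount : PySem.Str.count (PySem.Int.toStr (n : Int)) "1" = ones n := by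
      have h1 : ("1" : String).toList = ['1'] := rfl
      rw [PySem.Str.count, PySem.Int.toList_toStr, h1]
      have hch : PySem.Int.toChars (n : Int) = Nat.toDigits 10 n := by
        have hneg : ¬ ((n : Int) < 0) := by omega
        rw [PySem.Int.toChars, if_neg hneg]
        simp
      rw [hch, chars_count_single, toDigits_count]
    simp only [hloop, hcount, hx, decide_true, Bool.true_and]
    rw [mod2_natCast (ones n)]
    rcases Nat.mod_two_eq_zero_or_one (ones n) with h1 | h1 <;> simp [h1]
  · rw [iloscLoop.eq_def, if_neg hx]
    simp only [hx, decide_false, Bool.false_and]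
    simp [PySem.Int.mod]
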